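-- pv_equiv track=rewrite | github.com/sspeedy99/APS-2020 | CF/1343C.py | calculateMaxSum
-- ===== SOURCE A (Python) =====
-- def calculateMaxSum(n, li):
-- 	ar =[]
-- 	ar.append(li[0])
-- 	large =[]
-- 	for j in range(0, n-1):
-- 		if(li[j]>0 and li[j + 1]>0):
-- 			ar.append(li[j + 1])
-- 		elif(li[j]>0 and li[j + 1]<0):
-- 			large.append(max(ar))
-- 			ar =[]
-- 			ar.append(li[j + 1])
-- 		elif(li[j]<0 and li[j + 1]>0):
-- 			large.append(max(ar))
-- 			ar =[]
-- 			ar.append(li[j + 1])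
-- 		else:
-- 			ar.append(li[j + 1])
--
-- 	large.append(max(ar))
-- 	return sum(large)
-- ===== SOURCE B (Python) =====
-- def calculateMaxSum(n, li):
--     cuts = [j + 1 for j in range(n - 1) if li[j] * li[j + 1] < 0]
--     bounds = [0] + cuts + [n if n > 1 else 1]
--     return sum(max(li[a:b]) for a, b in zip(bounds, bounds[1:]))
-- ===== Notes on version B (the rewrite author's own statement) =====
-- stated objective: alternative
-- what changed: Replaces A's accumulator-and-reset loop (growing a segment list and flushing its max at each sign change) by computing the cut positions once (where adjacent elements have strictly opposite signs, so zeros merge runs exactly as in A), slicing the list at those cuts and summing the max of each slice.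
import Mathlib
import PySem

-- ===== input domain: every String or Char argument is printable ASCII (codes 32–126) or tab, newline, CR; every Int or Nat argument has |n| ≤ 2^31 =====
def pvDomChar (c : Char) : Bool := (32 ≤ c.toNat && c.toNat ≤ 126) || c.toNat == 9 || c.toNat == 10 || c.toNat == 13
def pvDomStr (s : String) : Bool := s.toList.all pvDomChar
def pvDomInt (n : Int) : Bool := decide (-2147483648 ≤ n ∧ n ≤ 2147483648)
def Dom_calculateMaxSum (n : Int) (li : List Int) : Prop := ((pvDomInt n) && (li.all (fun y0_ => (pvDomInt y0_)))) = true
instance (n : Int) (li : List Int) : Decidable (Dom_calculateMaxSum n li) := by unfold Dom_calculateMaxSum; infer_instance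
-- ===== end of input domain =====

-- B replaces A's accumulator-and-reset loop by computing the cut positions once and summing the max of each slice (objective: alternative).

-- ===== PORT A =====
def calculateMaxSum (n : Int) (li : List Int) : Int :=
  let ar : List Int := [] ++ [PySem.List.pyGetD li 0 0]
  let st :=
    (PySem.List.pyRange 0 (n - 1) 1).foldl
      (fun (st : List Int × List Int) j =>
        if PySem.List.pyGetD li j 0 > 0 ∧ PySem.List.pyGetD li (j + 1) 0 > 0 then
          (st.1 ++ [PySem.List.pyGetD li (j + 1) 0], st.2)
        else if PySem.List.pyGetD li j 0 > 0 ∧ PySem.List.pyGetD li (j + 1) 0 < 0 then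
          ([PySem.List.pyGetD li (j + 1) 0], st.2 ++ [(PySem.List.max? st.1 (fun y => y)).getD 0])
        else if PySem.List.pyGetD li j 0 < 0 ∧ PySem.List.pyGetD li (j + 1) 0 > 0 then
          ([PySem.List.pyGetD li (j + 1) 0], st.2 ++ [(PySem.List.max? st.1 (fun y => y)).getD 0])
        else (st.1 ++ [PySem.List.pyGetD li (j + 1) 0], st.2))
      (ar, ([] : List Int))
  (st.2 ++ [(PySem.List.max? st.1 (fun y => y)).getD 0]).sum

-- ===== PORT B =====
def calculateMaxSum_alt (n : Int) (li : List Int) : Int :=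
  let cuts :=
    ((PySem.List.pyRange 0 (n - 1) 1).filter
        (fun j => decide (PySem.List.pyGetD li j 0 * PySem.List.pyGetD li (j + 1) 0 < 0))).map
      (fun j => j + 1)
  let bounds := [0] ++ cuts ++ [if 1 < n then n else 1]
  ((bounds.zip bounds.tail).map
      (fun p => (PySem.List.max? (PySem.List.slice li (some p.1) (some p.2)) (fun y => y)).getD 0)).sum

-- ===== PRECONDITION & SPEC =====
-- Pre_ is exactly where the Python A returns: li nonempty (li[0]) and n ≤ len(li) (the loop reads li[n-1]).
def Pre_calculateMaxSum (n : Int) (li : List Int) : Prop := li ≠ [] ∧ n ≤ (li.length : Int)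
instance (n : Int) (li : List Int) : Decidable (Pre_calculateMaxSum n li) := by
  unfold Pre_calculateMaxSum; infer_instance
def pvWitness_calculateMaxSum : Int × List Int := (3, [1, -2, 3])

def Spec_calculateMaxSum (n : Int) (li : List Int) (out : Int) : Prop := out = calculateMaxSum_alt n li
instance (n : Int) (li : List Int) (out : Int) : Decidable (Spec_calculateMaxSum n li out) := by
  unfold Spec_calculateMaxSum; infer_instance

-- ===== CLAIM (what is proved, stated in full; the proofs are below) =====
def Claim_equal_calculateMaxSum : Prop := ∀ (n : Int) (li : List Int), Dom_calculateMaxSum n li → Pre_calculateMaxSum n li → Spec_calculateMaxSum n li (calculateMaxSum n li)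

-- ===== LEMMAS AND PROOFS =====

-- A's loop body, named for the proofs (definitionally the lambda in calculateMaxSum).
def aStep (li : List Int) (st : List Int × List Int) (j : Int) : List Int × List Int :=
  if PySem.List.pyGetD li j 0 > 0 ∧ PySem.List.pyGetD li (j + 1) 0 > 0 then
    (st.1 ++ [PySem.List.pyGetD li (j + 1) 0], st.2)
  else if PySem.List.pyGetD li j 0 > 0 ∧ PySem.List.pyGetD li (j + 1) 0 < 0 then
    ([PySem.List.pyGetD li (j + 1) 0], st.2 ++ [(PySem.List.max? st.1 (fun y => y)).getD 0])
  else if PySem.List.pyGetD li j 0 < 0 ∧ PySem.List.pyGetD li (j + 1) 0 > 0 then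
    ([PySem.List.pyGetD li (j + 1) 0], st.2 ++ [(PySem.List.max? st.1 (fun y => y)).getD 0])
  else (st.1 ++ [PySem.List.pyGetD li (j + 1) 0], st.2)

def stateA (li : List Int) (m : Nat) : List Int × List Int :=
  (PySem.List.pyRange 0 (m : Int) 1).foldl (aStep li) ([PySem.List.pyGetD li 0 0], [])

-- is there a cut between positions j and j+1?
def cutAt (li : List Int) (j : Nat) : Bool := decide (li.getD j 0 * li.getD (j + 1) 0 < 0)

-- position of the last cut among the first m gaps
def lastCut (li : List Int) : Nat → Nat
  | 0 => 0
  | m + 1 => if cutAt li m then m + 1 else lastCut li m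

def maxSeg (li : List Int) (a b : Nat) : Int :=
  (PySem.List.max? (PySem.List.slice li (some (a : Int)) (some (b : Int))) (fun y => y)).getD 0

-- sum of maxima of all completed segments among the first m+1 elements
def prevSum (li : List Int) : Nat → Int
  | 0 => 0
  | m + 1 => if cutAt li m then prevSum li m + maxSeg li (lastCut li m) (m + 1) else prevSum li m

def cutsB (li : List Int) (m : Nat) : List Int :=
  ((PySem.List.pyRange 0 (m : Int) 1).filter
      (fun j => decide (PySem.List.pyGetD li j 0 * PySem.List.pyGetD li (j + 1) 0 < 0))).map
    (fun j => j + 1)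

def pairSum (li : List Int) (bs : List Int) : Int :=
  ((bs.zip bs.tail).map
      (fun p => (PySem.List.max? (PySem.List.slice li (some p.1) (some p.2)) (fun y => y)).getD 0)).sum

lemma lastCut_le (li : List Int) (m : Nat) : lastCut li m ≤ m := by
  induction m with
  | zero => simp [lastCut]
  | succ m ih => simp only [lastCut]; split <;> omega

lemma slice_snoc (li : List Int) (c k : Nat) (hck : c ≤ k) (hk : k < li.length) :
    PySem.List.slice li (some (c : Int)) (some (k : Int)) ++ [li.getD k 0] =
      PySem.List.slice li (some (c : Int)) (some ((k : Int) + 1)) := by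
  have h1 : ((k : Int) + 1) = ((k + 1 : Nat) : Int) := by push_cast; ring
  rw [h1, PySem.List.slice_natCast, PySem.List.slice_natCast]
  have h2 : k + 1 - c = (k - c) + 1 := by omega
  rw [h2, List.take_add_one]
  have h3 : (li.drop c)[k - c]? = some li[k] := by
    rw [List.getElem?_drop]
    have : c + (k - c) = k := by omega
    rw [this, List.getElem?_eq_getElem hk]
  rw [h3, List.getD_eq_getElem li 0 hk]
  rfl

lemma slice_singleton (li : List Int) (k : Nat) (hk : k < li.length) :
    PySem.List.slice li (some (k : Int)) (some ((k : Int) + 1)) = [li.getD k 0] := by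
  have h1 : ((k : Int) + 1) = ((k + 1 : Nat) : Int) := by push_cast; ring
  rw [h1, PySem.List.slice_natCast]
  have h2 : k + 1 - k = 1 := by omega
  rw [h2, List.drop_eq_getElem_cons hk, List.getD_eq_getElem li 0 hk]
  rfl

lemma pairs_append_last (l : List Int) (e : Int) (h : l ≠ []) :
    (l ++ [e]).zip (l ++ [e]).tail = l.zip l.tail ++ [(l.getLast?.getD 0, e)] := by
  induction l with
  | nil => simp at h
  | cons x t ih =>
    cases t with
    | nil => simp
    | cons y t' =>
      have := ih (by simp)
      simp only [List.cons_append, List.tail_cons, List.zip_cons_cons] at *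
      rw [this]
      simp

lemma stateA_succ (li : List Int) (m : Nat) :
    stateA li (m + 1) = aStep li (stateA li m) (m : Int) := by
  unfold stateA
  rw [show ((m + 1 : Nat) : Int) = (m : Int) + 1 by push_cast; ring]
  rw [PySem.List.pyRange_one_succ_right (show (0 : Int) ≤ (m : Int) by omega)]
  rw [List.foldl_append]
  rfl

lemma stateA_spec (li : List Int) (m : Nat) (h : m + 1 ≤ li.length) :
    (stateA li m).1 =
        PySem.List.slice li (some ((lastCut li m : Nat) : Int)) (some ((m : Int) + 1)) ∧
      (stateA li m).2.sum = prevSum li m := by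
  induction m with
  | zero =>
    have hs : stateA li 0 = ([PySem.List.pyGetD li 0 0], []) := by
      unfold stateA
      rw [show PySem.List.pyRange 0 ((0 : Nat) : Int) 1 = [] from
        PySem.List.pyRange_one_eq_nil (by simp)]
      rfl
    constructor
    · rw [hs, show (((lastCut li 0 : Nat)) : Int) = ((0 : Nat) : Int) by norm_num [lastCut],
        slice_singleton li 0 (by omega), PySem.List.pyGetD_zero]
    · rw [hs]; simp [prevSum]
  | succ m ih =>
    have hm1 : m + 1 ≤ li.length := by omega
    obtain ⟨h1, h2⟩ := ih hm1
    have ha : PySem.List.pyGetD li (m : Int) 0 = li.getD m 0 := by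
      rw [PySem.List.pyGetD_natCast]
    have hb : PySem.List.pyGetD li ((m : Int) + 1) 0 = li.getD (m + 1) 0 := by
      rw [show ((m : Int) + 1) = ((m + 1 : Nat) : Int) by push_cast; ring,
        PySem.List.pyGetD_natCast]
    set a := li.getD m 0 with hadef
    set b := li.getD (m + 1) 0 with hbdef
    have hcut : cutAt li m = decide (a * b < 0) := by
      unfold cutAt; rw [hadef, hbdef]
    by_cases hc : a * b < 0
    · -- a cut: exactly the two reset branches of A
      have hcases : (a > 0 ∧ b < 0) ∨ (a < 0 ∧ b > 0) := by
        rcases mul_neg_iff.mp hc with ⟨ha1, hb1⟩ | ⟨ha1, hb1⟩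
        · exact Or.inl ⟨ha1, hb1⟩
        · exact Or.inr ⟨ha1, hb1⟩
      have hstate : stateA li (m + 1) =
          ([b], (stateA li m).2 ++ [(PySem.List.max? (stateA li m).1 (fun y => y)).getD 0]) := by
        rw [stateA_succ]
        unfold aStep
        rw [ha, hb]
        rcases hcases with ⟨h3, h4⟩ | ⟨h3, h4⟩
        · rw [if_neg (by omega), if_pos ⟨h3, h4⟩]
        · rw [if_neg (by omega), if_neg (by omega), if_pos ⟨h3, h4⟩]
      have hlc : lastCut li (m + 1) = m + 1 := by simp [lastCut, hcut, hc]
      constructor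
      · rw [hstate, hlc, show ((m + 1 : Nat) : Int) + 1 = (((m + 1 : Nat)) : Int) + 1 from rfl,
          slice_singleton li (m + 1) (by omega)]
      · rw [hstate]
        simp only [List.sum_append, List.sum_cons, List.sum_nil, h2]
        rw [show prevSum li (m + 1) = prevSum li m + maxSeg li (lastCut li m) (m + 1) by
          simp [prevSum, hcut, hc], h1]
        unfold maxSeg
        rw [show (((m + 1 : Nat)) : Int) = (m : Int) + 1 by push_cast; ring]
        ring
    · -- no cut: A appends to the running segment
      have hstate : stateA li (m + 1) = ((stateA li m).1 ++ [b], (stateA li m).2) := by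
        rw [stateA_succ]
        unfold aStep
        rw [ha, hb]
        by_cases hpp : a > 0 ∧ b > 0
        · rw [if_pos hpp]
        · rw [if_neg hpp, if_neg (by rintro ⟨h3, h4⟩; exact hc (mul_neg_iff.mpr (Or.inl ⟨h3, h4⟩))),
            if_neg (by rintro ⟨h3, h4⟩; exact hc (mul_neg_iff.mpr (Or.inr ⟨h3, h4⟩)))]
      have hlc : lastCut li (m + 1) = lastCut li m := by simp [lastCut, hcut, hc]
      constructor
      · rw [hstate, hlc, h1, hbdef,
          show ((m : Int) + 1) = ((m + 1 : Nat) : Int) by push_cast; ring]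
        exact slice_snoc li (lastCut li m) (m + 1)
          (by have := lastCut_le li m; omega) (by omega)
      · rw [hstate]
        simpa [prevSum, hcut, hc] using h2

lemma cutsB_last (li : List Int) (m : Nat) :
    pairSum li (0 :: cutsB li m) = prevSum li m ∧
      (0 :: cutsB li m).getLast?.getD 0 = ((lastCut li m : Nat) : Int) := by
  induction m with
  | zero =>
    have hs : cutsB li 0 = [] := by
      unfold cutsB
      rw [show PySem.List.pyRange 0 ((0 : Nat) : Int) 1 = [] from
        PySem.List.pyRange_one_eq_nil (by simp)]
      rfl
    rw [hs]
    constructor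
    · simp [pairSum, prevSum]
    · simp [lastCut]
  | succ m ih =>
    obtain ⟨h1, h2⟩ := ih
    have hrange : PySem.List.pyRange 0 ((m + 1 : Nat) : Int) 1 =
        PySem.List.pyRange 0 (m : Int) 1 ++ [(m : Int)] := by
      rw [show ((m + 1 : Nat) : Int) = (m : Int) + 1 by push_cast; ring]
      exact PySem.List.pyRange_one_succ_right (show (0 : Int) ≤ (m : Int) by omega)
    have hb : PySem.List.pyGetD li ((m : Int) + 1) 0 = li.getD (m + 1) 0 := by
      rw [show ((m : Int) + 1) = ((m + 1 : Nat) : Int) by push_cast; ring,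
        PySem.List.pyGetD_natCast]
    have hcond : (decide (PySem.List.pyGetD li (m : Int) 0 * PySem.List.pyGetD li ((m : Int) + 1) 0 < 0)) = cutAt li m := by
      unfold cutAt; rw [PySem.List.pyGetD_natCast, hb]
    have hfil : List.filter
        (fun j => decide (PySem.List.pyGetD li j 0 * PySem.List.pyGetD li (j + 1) 0 < 0))
        [(m : Int)] = if cutAt li m then [(m : Int)] else [] := by
      simp only [List.filter_cons, List.filter_nil]
      rw [hcond]
    have hcuts : cutsB li (m + 1) =
        cutsB li m ++ (if cutAt li m then [(m : Int) + 1] else []) := by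
      unfold cutsB
      rw [hrange, List.filter_append, List.map_append, hfil]
      split <;> rfl
    by_cases hc : cutAt li m
    · have hl : (0 :: cutsB li (m + 1)) = (0 :: cutsB li m) ++ [(m : Int) + 1] := by
        simp [hcuts, hc]
      constructor
      · rw [hl]
        unfold pairSum
        rw [pairs_append_last _ _ (by simp)]
        simp only [List.map_append, List.map_cons, List.map_nil, List.sum_append,
          List.sum_cons, List.sum_nil]
        rw [h2]
        have hps : ((((0 :: cutsB li m).zip (0 :: cutsB li m).tail).map
            (fun p => (PySem.List.max? (PySem.List.slice li (some p.1) (some p.2)) (fun y => y)).getD 0)).sum) =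
            prevSum li m := h1
        rw [hps]
        rw [show prevSum li (m + 1) = prevSum li m + maxSeg li (lastCut li m) (m + 1) by
          simp [prevSum, hc]]
        unfold maxSeg
        rw [show (((m + 1 : Nat)) : Int) = (m : Int) + 1 by push_cast; ring]
        ring
      · rw [hl, List.getLast?_concat]
        rw [show lastCut li (m + 1) = m + 1 by simp [lastCut, hc]]
        push_cast; rfl
    · have hl : (0 :: cutsB li (m + 1)) = (0 :: cutsB li m) := by simp [hcuts, hc]
      have hlc : lastCut li (m + 1) = lastCut li m := by simp [lastCut, hc]
      rw [hl, hlc, show prevSum li (m + 1) = prevSum li m by simp [prevSum, hc]]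
      exact ⟨h1, h2⟩

-- ===== VERDICT (by name: the statement is the Claim_ definition above) =====
theorem calculateMaxSum_spec : Claim_equal_calculateMaxSum := by
  intro n li _ hpre
  obtain ⟨hne, hlen⟩ := hpre
  unfold Spec_calculateMaxSum
  have hlen1 : 1 ≤ li.length := by
    cases li with
    | nil => exact absurd rfl hne
    | cons x t => simp
  set m : Nat := (n - 1).toNat with hm
  have hrange : PySem.List.pyRange 0 (n - 1) 1 = PySem.List.pyRange 0 (m : Int) 1 := by
    by_cases hn : 1 ≤ n
    · rw [hm, Int.toNat_of_nonneg (by omega)]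
    · rw [PySem.List.pyRange_one_eq_nil (by omega),
        PySem.List.pyRange_one_eq_nil (by rw [hm]; omega)]
  have hend : (if 1 < n then n else 1) = (m : Int) + 1 := by
    by_cases hn : 1 < n
    · rw [if_pos hn, hm, Int.toNat_of_nonneg (by omega)]; ring
    · rw [if_neg hn, hm, show (n - 1).toNat = 0 by omega]; norm_num
  have hmlen : m + 1 ≤ li.length := by
    by_cases hn : 1 ≤ n
    · have : (m : Int) = n - 1 := by rw [hm]; omega
      omega
    · have : m = 0 := by rw [hm]; omega
      omega
  obtain ⟨hA1, hA2⟩ := stateA_spec li m hmlen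
  obtain ⟨hB1, hB2⟩ := cutsB_last li m
  have hAdef : calculateMaxSum n li =
      ((PySem.List.pyRange 0 (n - 1) 1).foldl (aStep li) ([PySem.List.pyGetD li 0 0], []) |>
        fun st => (st.2 ++ [(PySem.List.max? st.1 (fun y => y)).getD 0]).sum) := rfl
  have hBdef : calculateMaxSum_alt n li =
      pairSum li ([0] ++
        ((PySem.List.pyRange 0 (n - 1) 1).filter
            (fun j => decide (PySem.List.pyGetD li j 0 * PySem.List.pyGetD li (j + 1) 0 < 0))).map
          (fun j => j + 1) ++ [if 1 < n then n else 1]) := rfl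
  rw [hAdef, hBdef, hrange, hend]
  show ((stateA li m).2 ++ [(PySem.List.max? (stateA li m).1 (fun y => y)).getD 0]).sum =
    pairSum li ((0 :: cutsB li m) ++ [(m : Int) + 1])
  rw [List.sum_append, hA2, List.sum_cons, List.sum_nil]
  unfold pairSum
  rw [pairs_append_last _ _ (by simp), hB2]
  simp only [List.map_append, List.map_cons, List.map_nil, List.sum_append,
    List.sum_cons, List.sum_nil]
  have hps : ((((0 :: cutsB li m).zip (0 :: cutsB li m).tail).map
      (fun p => (PySem.List.max? (PySem.List.slice li (some p.1) (some p.2)) (fun y => y)).getD 0)).sum) =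
      prevSum li m := hB1
  rw [hps, hA1]
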